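-- pv_equiv track=rewrite | github.com/RBHA-AI/Invoice-Generator | performa.py | int_to_indian_words
-- ===== SOURCE A (Python) =====
-- ONES = ["", "One", "Two", "Three", "Four", "Five", "Six", "Seven", "Eight", "Nine",
--         "Ten", "Eleven", "Twelve", "Thirteen", "Fourteen", "Fifteen", "Sixteen",
--         "Seventeen", "Eighteen", "Nineteen"]
--
-- TENS = ["", "", "Twenty", "Thirty", "Forty", "Fifty", "Sixty", "Seventy", "Eighty", "Ninety"]
--
-- def two_digit_words(n: int) -> str:
--     if n < 20:
--         return ONES[n]
--     t, o = divmod(n, 10)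
--     return (TENS[t] + (" " + ONES[o] if o else "")).strip()
--
-- def three_digit_words(n: int) -> str:
--     h, r = divmod(n, 100)
--     out = ""
--     if h:
--         out += ONES[h] + " Hundred"
--         if r:
--             out += " "
--     if r:
--         out += two_digit_words(r)
--     return out.strip()
--
-- def int_to_indian_words(n: int) -> str:
--     if n == 0:
--         return "Zero"
--     parts = []
--     crore, n = divmod(n, 10_000_000)
--     lakh, n = divmod(n, 100_000)
--     thousand, n = divmod(n, 1000)
--     rem = n
--     if crore:
--         parts.append(int_to_indian_words(crore) + " Crore")
--     if lakh:
--         parts.append(two_digit_words(lakh) + " Lakh")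
--     if thousand:
--         parts.append(two_digit_words(thousand) + " Thousand")
--     if rem:
--         parts.append(three_digit_words(rem))
--     return " ".join([p for p in parts if p]).strip()
-- ===== SOURCE B (Python) =====
-- ONES = ["", "One", "Two", "Three", "Four", "Five", "Six", "Seven", "Eight", "Nine",
--         "Ten", "Eleven", "Twelve", "Thirteen", "Fourteen", "Fifteen", "Sixteen",
--         "Seventeen", "Eighteen", "Nineteen"]
--
-- TENS = ["", "", "Twenty", "Thirty", "Forty", "Fifty", "Sixty", "Seventy", "Eighty", "Ninety"]
--
--
-- def _two(n: int) -> str: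
--     if n < 20:
--         return ONES[n]
--     t, o = divmod(n, 10)
--     return TENS[t] if o == 0 else TENS[t] + " " + ONES[o]
--
--
-- def _chunk(c: int) -> str:
--     """Words for one 7-digit group 0 <= c < 10**7, without any scale suffix."""
--     lakh, r = divmod(c, 100_000)
--     thousand, r = divmod(r, 1000)
--     hundred, r = divmod(r, 100)
--     pieces = []
--     if lakh:
--         pieces.append(_two(lakh) + " Lakh")
--     if thousand:
--         pieces.append(_two(thousand) + " Thousand")
--     if hundred:
--         pieces.append(ONES[hundred] + " Hundred")
--     if r:
--         pieces.append(_two(r))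
--     return " ".join(pieces)
--
--
-- def int_to_indian_words(n: int) -> str:
--     if n == 0:
--         return "Zero"
--     chunks = []
--     while n > 0:
--         n, c = divmod(n, 10_000_000)
--         chunks.append(c)
--     words = []
--     for i, c in enumerate(chunks):
--         w = _chunk(c)
--         if w:
--             words.append(w + " Crore" * i)
--     return " ".join(reversed(words))
-- ===== Notes on version B (the rewrite author's own statement) =====
-- stated objective: alternative
-- what changed: A renders the number by recursing on the crore part inside string construction, then strips and filters; B iteratively peels the low seven-digit chunks off with divmod into a list, renders each chunk independently (suffixing one ' Crore' per chunk index) and joins the non-empty renderings back-to-front, with no strip/filter post-processing.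
import Mathlib
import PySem

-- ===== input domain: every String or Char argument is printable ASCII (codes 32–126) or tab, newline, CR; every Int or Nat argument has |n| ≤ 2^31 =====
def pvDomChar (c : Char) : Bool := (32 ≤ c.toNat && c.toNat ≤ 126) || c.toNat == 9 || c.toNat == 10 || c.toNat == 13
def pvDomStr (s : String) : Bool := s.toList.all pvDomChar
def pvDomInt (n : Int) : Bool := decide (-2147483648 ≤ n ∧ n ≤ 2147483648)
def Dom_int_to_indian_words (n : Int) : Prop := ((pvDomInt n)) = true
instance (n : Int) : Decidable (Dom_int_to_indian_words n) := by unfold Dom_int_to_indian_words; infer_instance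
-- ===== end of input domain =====

-- B replaces A's recursion on n // 10^7 by an iterative peel of 7-digit chunks rendered
-- back-to-front (objective: simpler/alternative decomposition; same asymptotic cost).

-- ===== PORT A =====
def pvONES : List String :=
  ["", "One", "Two", "Three", "Four", "Five", "Six", "Seven", "Eight", "Nine",
   "Ten", "Eleven", "Twelve", "Thirteen", "Fourteen", "Fifteen", "Sixteen",
   "Seventeen", "Eighteen", "Nineteen"]

def pvTENS : List String :=
  ["", "", "Twenty", "Thirty", "Forty", "Fifty", "Sixty", "Seventy", "Eighty", "Ninety"]

-- ONES[i] / TENS[i]; on every input admitted by Pre_ the index is in range, so the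
-- `.getD ""` totalization is never the value Python would raise on.
def pvGetS (xs : List String) (i : Int) : String := (PySem.List.pyGet? xs i).getD ""

def twoDigitWordsA (n : Int) : String :=
  if n < 20 then pvGetS pvONES n
  else
    let t := PySem.Int.floordiv n 10
    let o := PySem.Int.mod n 10
    PySem.Str.strip (pvGetS pvTENS t ++ (if o ≠ 0 then " " ++ pvGetS pvONES o else ""))

def threeDigitWordsA (n : Int) : String :=
  let h := PySem.Int.floordiv n 100
  let r := PySem.Int.mod n 100
  let out : String := ""
  let out := if h ≠ 0 then out ++ pvGetS pvONES h ++ " Hundred" ++ (if r ≠ 0 then " " else "") else out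
  let out := if r ≠ 0 then out ++ twoDigitWordsA r else out
  PySem.Str.strip out

-- Fuel is a totality guard only: for every n ≥ 0 the Python recursion (on n // 10^7 < n)
-- has depth ≤ n.natAbs + 1, so the 0-fuel branch is never reached inside Pre_.
-- (On n < 0 Python recurses forever / RecursionError; those inputs are outside Pre_.)
def intToIndianFuel : Nat → Int → String
  | 0, _ => ""
  | fuel+1, n =>
    if n = 0 then "Zero" else
      let crore := PySem.Int.floordiv n 10000000
      let n1 := PySem.Int.mod n 10000000
      let lakh := PySem.Int.floordiv n1 100000
      let n2 := PySem.Int.mod n1 100000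
      let thousand := PySem.Int.floordiv n2 1000
      let rem := PySem.Int.mod n2 1000
      let parts : List String := []
      let parts := if crore ≠ 0 then parts ++ [intToIndianFuel fuel crore ++ " Crore"] else parts
      let parts := if lakh ≠ 0 then parts ++ [twoDigitWordsA lakh ++ " Lakh"] else parts
      let parts := if thousand ≠ 0 then parts ++ [twoDigitWordsA thousand ++ " Thousand"] else parts
      let parts := if rem ≠ 0 then parts ++ [threeDigitWordsA rem] else parts
      PySem.Str.strip (PySem.Str.join " " (parts.filter (fun p => p ≠ "")))

def int_to_indian_words (n : Int) : String := intToIndianFuel (n.natAbs + 1) n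

-- ===== PORT B =====
def twoB (n : Int) : String :=
  if n < 20 then pvGetS pvONES n
  else
    let t := PySem.Int.floordiv n 10
    let o := PySem.Int.mod n 10
    if o = 0 then pvGetS pvTENS t else pvGetS pvTENS t ++ " " ++ pvGetS pvONES o

def chunkB (c : Int) : String :=
  let lakh := PySem.Int.floordiv c 100000
  let r := PySem.Int.mod c 100000
  let thousand := PySem.Int.floordiv r 1000
  let r1 := PySem.Int.mod r 1000
  let hundred := PySem.Int.floordiv r1 100
  let r2 := PySem.Int.mod r1 100
  let pieces : List String := []
  let pieces := if lakh ≠ 0 then pieces ++ [twoB lakh ++ " Lakh"] else pieces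
  let pieces := if thousand ≠ 0 then pieces ++ [twoB thousand ++ " Thousand"] else pieces
  let pieces := if hundred ≠ 0 then pieces ++ [pvGetS pvONES hundred ++ " Hundred"] else pieces
  let pieces := if r2 ≠ 0 then pieces ++ [twoB r2] else pieces
  PySem.Str.join " " pieces

-- the `while n > 0: n, c = divmod(n, 10**7); chunks.append(c)` loop
def chunksB (n : Int) : List Int :=
  if h : 0 < n then
    PySem.Int.mod n 10000000 :: chunksB (PySem.Int.floordiv n 10000000)
  else []
termination_by n.toNat
decreasing_by
  rw [PySem.Int.floordiv_eq_ediv_of_pos (by norm_num)]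
  omega

-- " Crore" * i
def strRepeat (s : String) (i : Int) : String := PySem.Str.join "" (List.replicate i.toNat s)

def int_to_indian_words_alt (n : Int) : String :=
  if n = 0 then "Zero"
  else
    let chunks := chunksB n
    let words := (PySem.List.enumerate chunks).foldl
      (fun ws ic =>
        let w := chunkB ic.2
        if w ≠ "" then ws ++ [w ++ strRepeat " Crore" ic.1] else ws) []
    PySem.Str.join " " words.reverse

-- ===== PRECONDITION & SPEC =====
-- Pre_ excludes negative inputs, on which Python A recurses forever on the crore part
-- (which never reaches zero there) and dies with RecursionError: it never returns a value.
def Pre_int_to_indian_words (n : Int) : Prop := 0 ≤ n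
instance (n : Int) : Decidable (Pre_int_to_indian_words n) := by
  unfold Pre_int_to_indian_words; infer_instance

def pvWitness_int_to_indian_words : Int := (123456789)

def Spec_int_to_indian_words (n : Int) (out : String) : Prop := out = int_to_indian_words_alt n
instance (n : Int) (out : String) : Decidable (Spec_int_to_indian_words n out) := by
  unfold Spec_int_to_indian_words; infer_instance

-- ===== CLAIM (what is proved, stated in full; the proofs are below) =====
def Claim_equal_int_to_indian_words : Prop :=
  ∀ (n : Int), Dom_int_to_indian_words n → Pre_int_to_indian_words n →
    Spec_int_to_indian_words n (int_to_indian_words n)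

-- ===== LEMMAS AND PROOFS =====

-- "clean" strings: nonempty, no leading or trailing whitespace
def headOKc : List Char → Bool
  | [] => false
  | c :: _ => !PySem.Chars.isspace c

def lastOKc (cs : List Char) : Bool := headOKc cs.reverse

def cleanC (cs : List Char) : Bool := headOKc cs && lastOKc cs

lemma dropWhile_of_headOK {cs : List Char} (h : headOKc cs = true) :
    cs.dropWhile PySem.Chars.isspace = cs := by
  cases cs with
  | nil => rfl
  | cons c t =>
    simp only [headOKc, Bool.not_eq_true'] at h
    simp [List.dropWhile, h]

lemma strip_of_cleanC {cs : List Char} (h : cleanC cs = true) :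
    PySem.Chars.strip cs = cs := by
  simp only [cleanC, Bool.and_eq_true] at h
  simp only [PySem.Chars.strip, PySem.Chars.lstrip, PySem.Chars.rstrip,
    dropWhile_of_headOK h.1, dropWhile_of_headOK h.2, List.reverse_reverse]

lemma headOKc_append {a : List Char} (b : List Char) (h : headOKc a = true) :
    headOKc (a ++ b) = true := by
  cases a with
  | nil => simp [headOKc] at h
  | cons c t => simpa [headOKc] using h

lemma lastOKc_append (a : List Char) {b : List Char} (h : lastOKc b = true) :
    lastOKc (a ++ b) = true := by
  simp only [lastOKc, List.reverse_append] at *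
  exact headOKc_append _ h

lemma cleanC_append {a b : List Char} (ha : headOKc a = true) (hb : lastOKc b = true) :
    cleanC (a ++ b) = true := by
  simp [cleanC, headOKc_append _ ha, lastOKc_append _ hb]

lemma cleanC_ne_nil {cs : List Char} (h : cleanC cs = true) : cs ≠ [] := by
  intro hn; subst hn; simp [cleanC, headOKc] at h

def cleanS (s : String) : Bool := cleanC s.toList

lemma intercalate_cons {sep x : List Char} {ys : List (List Char)} (hy : ys ≠ []) :
    List.intercalate sep (x :: ys) = x ++ sep ++ List.intercalate sep ys := by
  cases ys with
  | nil => simp at hy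
  | cons b u => simp [List.intercalate, List.intersperse]

lemma intercalate_append {sep : List Char} {xs ys : List (List Char)}
    (hx : xs ≠ []) (hy : ys ≠ []) :
    List.intercalate sep (xs ++ ys) =
      List.intercalate sep xs ++ sep ++ List.intercalate sep ys := by
  induction xs with
  | nil => simp at hx
  | cons a t ih =>
    cases t with
    | nil => rw [List.singleton_append, intercalate_cons hy]; simp [List.intercalate]
    | cons c u =>
      rw [List.cons_append, intercalate_cons (by simp), intercalate_cons (by simp),
        ih (by simp) ]
      simp

lemma cleanC_intercalate {ps : List (List Char)} (hne : ps ≠ [])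
    (h : ∀ p ∈ ps, cleanC p = true) :
    cleanC (List.intercalate [' '] ps) = true := by
  induction ps with
  | nil => simp at hne
  | cons a t ih =>
    cases t with
    | nil => simpa [List.intercalate] using h a (by simp)
    | cons b u =>
      rw [intercalate_cons (by simp)]
      have ha := h a (by simp)
      have ht := ih (by simp) (fun p hp => h p (by simp [hp]))
      simp only [cleanC, Bool.and_eq_true] at ha ht ⊢
      constructor
      · exact headOKc_append _ (headOKc_append _ ha.1)
      · rw [List.append_assoc]; exact lastOKc_append _ (lastOKc_append _ ht.2)

lemma strip_join_filter (ps : List String) (h : ∀ p ∈ ps, cleanS p = true) :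
    PySem.Str.strip (PySem.Str.join " " (ps.filter (fun p => p ≠ ""))) =
      PySem.Str.join " " ps := by
  have hfilter : ps.filter (fun p => p ≠ "") = ps := by
    apply List.filter_eq_self.mpr
    intro p hp
    have := cleanC_ne_nil (h p hp)
    simpa [String.toList_eq_nil_iff] using fun hq => this (by simp [hq])
  rw [hfilter]
  cases hps : ps with
  | nil => rfl
  | cons a t =>
    subst hps
    simp only [PySem.Str.strip, PySem.Str.join, String.toList_ofList]
    congr 1
    apply strip_of_cleanC
    apply cleanC_intercalate (by simp)
    intro p hp
    simp only [List.mem_map] at hp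
    obtain ⟨q, hq, rfl⟩ := hp
    exact h q hq

-- A's piece list for one 7-digit chunk (the non-crore parts of A's main body)
def lowPieces (c : Int) : List String :=
  let lakh := PySem.Int.floordiv c 100000
  let n2 := PySem.Int.mod c 100000
  let thousand := PySem.Int.floordiv n2 1000
  let rem := PySem.Int.mod n2 1000
  (if lakh ≠ 0 then [twoDigitWordsA lakh ++ " Lakh"] else []) ++
  (if thousand ≠ 0 then [twoDigitWordsA thousand ++ " Thousand"] else []) ++
  (if rem ≠ 0 then [threeDigitWordsA rem] else [])

-- B's piece list for one 7-digit chunk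
def bPieces (c : Int) : List String :=
  let lakh := PySem.Int.floordiv c 100000
  let r := PySem.Int.mod c 100000
  let thousand := PySem.Int.floordiv r 1000
  let r1 := PySem.Int.mod r 1000
  let hundred := PySem.Int.floordiv r1 100
  let r2 := PySem.Int.mod r1 100
  (if lakh ≠ 0 then [twoB lakh ++ " Lakh"] else []) ++
  (if thousand ≠ 0 then [twoB thousand ++ " Thousand"] else []) ++
  (if hundred ≠ 0 then [pvGetS pvONES hundred ++ " Hundred"] else []) ++
  (if r2 ≠ 0 then [twoB r2] else [])

lemma two_eq_and_clean : ∀ k : Fin 100,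
    twoDigitWordsA (k : Int) = twoB (k : Int) ∧
    (k.val ≠ 0 → cleanS (twoB (k : Int)) = true) := by decide

lemma ones_clean : ∀ k : Fin 20, k.val ≠ 0 → cleanS (pvGetS pvONES (k : Int)) = true := by decide

lemma chunkB_eq_join (c : Int) : chunkB c = PySem.Str.join " " (bPieces c) := by
  unfold chunkB bPieces
  dsimp only
  split_ifs <;> simp

-- String-level wrappers
lemma stripS_of_clean {s : String} (h : cleanS s = true) : PySem.Str.strip s = s := by
  apply String.toList_inj.mp
  simp [PySem.Str.strip, strip_of_cleanC h]

lemma cleanS_ne_empty {s : String} (h : cleanS s = true) : s ≠ "" := by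
  intro hn; subst hn; simp [cleanS, cleanC, headOKc] at h

lemma joinS_single (sep : String) (a : String) : PySem.Str.join sep [a] = a := by
  apply String.toList_inj.mp
  simp [PySem.Str.join, List.intercalate]

lemma joinS_append {xs ys : List String} (hx : xs ≠ []) (hy : ys ≠ []) :
    PySem.Str.join " " (xs ++ ys) =
      PySem.Str.join " " xs ++ " " ++ PySem.Str.join " " ys := by
  apply String.toList_inj.mp
  simp only [PySem.Str.join, PySem.Chars.join, String.toList_ofList, List.map_append,
    String.toList_append]
  rw [intercalate_append (by simpa using hx) (by simpa using hy)]

lemma joinS_pair (a b : String) : PySem.Str.join " " [a, b] = a ++ " " ++ b := by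
  have := joinS_append (xs := [a]) (ys := [b]) (by simp) (by simp)
  simpa [joinS_single] using this

lemma cleanS_join {ps : List String} (hne : ps ≠ []) (h : ∀ p ∈ ps, cleanS p = true) :
    cleanS (PySem.Str.join " " ps) = true := by
  simp only [cleanS, PySem.Str.join, String.toList_ofList]
  apply cleanC_intercalate (by simpa using hne)
  intro p hp
  simp only [List.mem_map] at hp
  obtain ⟨q, hq, rfl⟩ := hp
  exact h q hq

lemma cleanS_append_word {a b : String} (ha : cleanS a = true) (hb : lastOKc b.toList = true) :
    cleanS (a ++ b) = true := by
  have ha' : headOKc a.toList = true := by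
    simp only [cleanS, cleanC, Bool.and_eq_true] at ha; exact ha.1
  simp only [cleanS, String.toList_append]
  exact cleanC_append ha' hb

-- casts of the finite decide lemmas to Int hypotheses
lemma two_eq (m : Int) (h0 : 0 ≤ m) (h1 : m < 100) : twoDigitWordsA m = twoB m := by
  have h := (two_eq_and_clean ⟨m.toNat, by omega⟩).1
  simpa [Int.toNat_of_nonneg h0] using h

lemma two_clean (m : Int) (h0 : 0 < m) (h1 : m < 100) : cleanS (twoB m) = true := by
  have h := (two_eq_and_clean ⟨m.toNat, by omega⟩).2 (show m.toNat ≠ 0 by omega)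
  simpa [Int.toNat_of_nonneg (by omega : (0:Int) ≤ m)] using h

lemma onesS_clean (m : Int) (h0 : 0 < m) (h1 : m < 20) : cleanS (pvGetS pvONES m) = true := by
  have h := ones_clean ⟨m.toNat, by omega⟩ (show m.toNat ≠ 0 by omega)
  simpa [Int.toNat_of_nonneg (by omega : (0:Int) ≤ m)] using h

lemma cleanS_head {s : String} (h : cleanS s = true) : headOKc s.toList = true := by
  simp only [cleanS, cleanC, Bool.and_eq_true] at h; exact h.1

lemma cleanS_last {s : String} (h : cleanS s = true) : lastOKc s.toList = true := by
  simp only [cleanS, cleanC, Bool.and_eq_true] at h; exact h.2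

lemma threeDigit_eq (rem : Int) (h0 : 0 < rem) (h1 : rem < 1000) :
    threeDigitWordsA rem = PySem.Str.join " "
      ((if PySem.Int.floordiv rem 100 ≠ 0 then
          [pvGetS pvONES (PySem.Int.floordiv rem 100) ++ " Hundred"] else []) ++
       (if PySem.Int.mod rem 100 ≠ 0 then [twoB (PySem.Int.mod rem 100)] else [])) := by
  unfold threeDigitWordsA
  dsimp only
  rw [PySem.Int.floordiv_eq_ediv_of_pos (by norm_num), PySem.Int.mod_eq_emod_of_pos (by norm_num)]
  have hh9 : rem / 100 < 10 := by omega
  have hr0 : 0 ≤ rem % 100 := by omega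
  have hr9 : rem % 100 < 100 := by omega
  by_cases hH : rem / 100 = 0
  · have hR : rem % 100 ≠ 0 := by omega
    simp [hH, hR]
    rw [two_eq _ hr0 hr9, joinS_single]
    exact stripS_of_clean (two_clean _ (by omega) hr9)
  · by_cases hR : rem % 100 = 0
    · simp [hH, hR]
      rw [joinS_single]
      exact stripS_of_clean
        (cleanS_append_word (onesS_clean _ (by omega) (by omega)) (by decide))
    · simp [hH, hR]
      rw [two_eq _ hr0 hr9, joinS_pair]
      apply stripS_of_clean
      have h2 := two_clean (rem % 100) (by omega) hr9
      have hO := onesS_clean (rem / 100) (by omega) (by omega)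
      simp only [cleanS, String.toList_append]
      apply cleanC_append
      · exact headOKc_append _ (headOKc_append _ (cleanS_head hO))
      · exact cleanS_last h2

lemma ediv_rw (b : Int) (hb : 0 < b) :
    (∀ a : Int, PySem.Int.floordiv a b = a / b) ∧ (∀ a : Int, PySem.Int.mod a b = a % b) :=
  ⟨fun a => PySem.Int.floordiv_eq_ediv_of_pos hb, fun a => PySem.Int.mod_eq_emod_of_pos hb⟩

lemma mem_ite_singleton {α : Type} {p x : α} {cond : Prop} [Decidable cond]
    (h : p ∈ (if cond then [x] else [])) : p = x ∧ cond := by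
  split at h
  · simp at h; exact ⟨h, by assumption⟩
  · simp at h

lemma low_master (c : Int) (hc0 : 0 ≤ c) (hc7 : c < 10000000) :
    PySem.Str.join " " (lowPieces c) = chunkB c ∧
    (∀ p ∈ lowPieces c, cleanS p = true) ∧
    (c = 0 → lowPieces c = []) ∧ (c ≠ 0 → lowPieces c ≠ []) := by
  have e5 := ediv_rw 100000 (by norm_num)
  have e3 := ediv_rw 1000 (by norm_num)
  have e2 := ediv_rw 100 (by norm_num)
  have hL0 : 0 ≤ c / 100000 := by omega
  have hL9 : c / 100000 < 100 := by omega
  have hT0 : 0 ≤ c % 100000 / 1000 := by omega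
  have hT9 : c % 100000 / 1000 < 100 := by omega
  have hR0 : 0 ≤ c % 100000 % 1000 := by omega
  have hR9 : c % 100000 % 1000 < 1000 := by omega
  have hLow : lowPieces c =
      ((if c / 100000 ≠ 0 then [twoB (c / 100000) ++ " Lakh"] else []) ++
       (if c % 100000 / 1000 ≠ 0 then [twoB (c % 100000 / 1000) ++ " Thousand"] else [])) ++
      (if c % 100000 % 1000 ≠ 0 then [threeDigitWordsA (c % 100000 % 1000)] else []) := by
    unfold lowPieces
    dsimp only
    simp only [e5.1, e5.2, e3.1, e3.2]
    rw [List.append_assoc]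
    by_cases hl : c / 100000 = 0 <;> by_cases ht : c % 100000 / 1000 = 0 <;>
      simp [hl, ht, two_eq _ hL0 hL9, two_eq _ hT0 hT9]
  have hB : chunkB c =
      PySem.Str.join " "
        (((if c / 100000 ≠ 0 then [twoB (c / 100000) ++ " Lakh"] else []) ++
          (if c % 100000 / 1000 ≠ 0 then [twoB (c % 100000 / 1000) ++ " Thousand"] else [])) ++
         ((if c % 100000 % 1000 / 100 ≠ 0 then
             [pvGetS pvONES (c % 100000 % 1000 / 100) ++ " Hundred"] else []) ++
          (if c % 100000 % 1000 % 100 ≠ 0 then [twoB (c % 100000 % 1000 % 100)] else []))) := by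
    rw [chunkB_eq_join]
    unfold bPieces
    dsimp only
    simp only [e5.1, e5.2, e3.1, e3.2, e2.1, e2.2]
    congr 1
    simp [List.append_assoc]
  -- clean members of lowPieces
  have hclean : ∀ p ∈ lowPieces c, cleanS p = true := by
    rw [hLow]
    intro p hp
    simp only [List.mem_append] at hp
    rcases hp with (hp | hp) | hp
    · obtain ⟨rfl, hcond⟩ := mem_ite_singleton hp
      exact cleanS_append_word (two_clean _ (by omega) hL9) (by decide)
    · obtain ⟨rfl, hcond⟩ := mem_ite_singleton hp
      exact cleanS_append_word (two_clean _ (by omega) hT9) (by decide)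
    · obtain ⟨rfl, hcond⟩ := mem_ite_singleton hp
      rw [threeDigit_eq _ (by omega) hR9]
      apply cleanS_join
      · by_cases hh : c % 100000 % 1000 / 100 = 0 <;> simp [hh, e2.1, e2.2] <;> omega
      · intro q hq2
        simp only [e2.1, e2.2, List.mem_append] at hq2
        rcases hq2 with hq2 | hq2
        · obtain ⟨rfl, hw⟩ := mem_ite_singleton hq2
          exact cleanS_append_word (onesS_clean _ (by omega) (by omega)) (by decide)
        · obtain ⟨rfl, hw⟩ := mem_ite_singleton hq2
          exact two_clean _ (by omega) (by omega)
  refine ⟨?_, hclean, ?_, ?_⟩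
  · rw [hLow, hB]
    by_cases hr : c % 100000 % 1000 = 0
    · have h1 : c % 100000 % 1000 / 100 = 0 := by omega
      have h2 : c % 100000 % 1000 % 100 = 0 := by omega
      simp [hr, h1, h2]
    · rw [threeDigit_eq _ (by omega) hR9]
      simp only [e2.1, e2.2]
      rw [if_pos hr]
      have key : ∀ (X T : List String), T ≠ [] →
          PySem.Str.join " " (X ++ [PySem.Str.join " " T]) = PySem.Str.join " " (X ++ T) := by
        intro X T hT
        cases X with
        | nil => simp [joinS_single]
        | cons a t =>
          rw [joinS_append (by simp) (by simp), joinS_append (by simp) hT, joinS_single]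
      apply key
      by_cases hh : c % 100000 % 1000 / 100 = 0 <;>
        by_cases hw : c % 100000 % 1000 % 100 = 0 <;> simp [hh, hw] <;> omega
  · intro hc; subst hc; rw [hLow]; norm_num
  · intro hc; rw [hLow]
    have : ¬(c / 100000 = 0 ∧ c % 100000 / 1000 = 0 ∧ c % 100000 % 1000 = 0) := by omega
    by_cases hl : c / 100000 = 0 <;> by_cases ht : c % 100000 / 1000 = 0 <;> simp [hl, ht] <;> omega

lemma A_step (fuel : Nat) (n : Int) (h0 : 0 < n) :
    intToIndianFuel (fuel+1) n = PySem.Str.strip (PySem.Str.join " "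
      (((if PySem.Int.floordiv n 10000000 ≠ 0 then
           [intToIndianFuel fuel (PySem.Int.floordiv n 10000000) ++ " Crore"] else []) ++
        lowPieces (PySem.Int.mod n 10000000)).filter (fun p => p ≠ ""))) := by
  conv_lhs => rw [intToIndianFuel]
  rw [if_neg (by omega)]
  dsimp only
  unfold lowPieces
  dsimp only
  congr 2
  split_ifs <;> simp

lemma chunkB_clean (c : Int) (h0 : 0 < c) (h7 : c < 10000000) : cleanS (chunkB c) = true := by
  obtain ⟨hjoin, hclean, -, hne⟩ := low_master c (by omega) h7
  rw [← hjoin]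
  exact cleanS_join (hne (by omega)) hclean

lemma chunk_eq (fuel : Nat) (c : Int) (h0 : 0 < c) (h7 : c < 10000000) :
    intToIndianFuel (fuel+1) c = chunkB c := by
  rw [A_step fuel c h0]
  have hcr : PySem.Int.floordiv c 10000000 = 0 := by
    rw [(ediv_rw 10000000 (by norm_num)).1]; omega
  have hmd : PySem.Int.mod c 10000000 = c := by
    rw [(ediv_rw 10000000 (by norm_num)).2]; omega
  rw [hcr, hmd, if_neg (by simp), List.nil_append]
  obtain ⟨hjoin, hclean, -, -⟩ := low_master c (by omega) h7
  rw [strip_join_filter _ hclean, hjoin]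

lemma chunksB_nonpos (n : Int) (h : n ≤ 0) : chunksB n = [] := by
  rw [chunksB, dif_neg (by omega)]

lemma chunksB_small (n : Int) (h0 : 0 < n) (h7 : n < 10000000) : chunksB n = [n] := by
  rw [chunksB, dif_pos h0, (ediv_rw 10000000 (by norm_num)).2, (ediv_rw 10000000 (by norm_num)).1]
  rw [Int.emod_eq_of_lt (by omega) (by omega)]
  rw [chunksB_nonpos _ (by omega)]

lemma B_small (n : Int) (h0 : 0 < n) (h7 : n < 10000000) :
    int_to_indian_words_alt n = chunkB n := by
  unfold int_to_indian_words_alt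
  rw [if_neg (by omega)]
  dsimp only
  rw [chunksB_small n h0 h7]
  have hne : chunkB n ≠ "" := cleanS_ne_empty (chunkB_clean n h0 h7)
  simp only [PySem.List.enumerate, List.foldl, if_pos hne]
  have hrep : strRepeat " Crore" 0 = "" := by decide
  rw [hrep, String.append_empty]
  simp [joinS_single]

lemma B_big (n : Int) (h7 : 10000000 ≤ n) (h31 : n ≤ 2147483648) :
    int_to_indian_words_alt n = PySem.Str.join " "
      ([chunkB (PySem.Int.floordiv n 10000000) ++ " Crore"] ++
       (if chunkB (PySem.Int.mod n 10000000) ≠ "" then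
          [chunkB (PySem.Int.mod n 10000000)] else [])) := by
  have e7 := ediv_rw 10000000 (by norm_num)
  have hq1 : 1 ≤ n / 10000000 := by omega
  have hq2 : n / 10000000 < 10000000 := by omega
  unfold int_to_indian_words_alt
  rw [if_neg (by omega)]
  dsimp only
  rw [chunksB, dif_pos (by omega), chunksB_small _ (by rw [e7.1]; omega) (by rw [e7.1]; omega)]
  have hcrne : chunkB (PySem.Int.floordiv n 10000000) ≠ "" := by
    rw [e7.1]; exact cleanS_ne_empty (chunkB_clean _ (by omega) (by omega))
  have hrep : strRepeat " Crore" 1 = " Crore" := by decide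
  simp only [PySem.List.enumerate, List.foldl, zero_add, hrep]
  have hrep0 : strRepeat " Crore" 0 = "" := by decide
  have hcrne' : chunkB (n / 10000000) ≠ "" := by rwa [e7.1] at hcrne
  rw [e7.2]
  by_cases hc0 : chunkB (n % 10000000) = "" <;>
    simp [hc0, hcrne', hrep0, String.append_empty]

theorem int_to_indian_words_spec : Claim_equal_int_to_indian_words := by
  intro n hdom hpre
  unfold Spec_int_to_indian_words
  have hd : n ≤ 2147483648 := by
    simp only [Dom_int_to_indian_words, pvDomInt, decide_eq_true_eq] at hdom
    exact hdom.2
  have hpre' : 0 ≤ n := hpre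
  have e7 := ediv_rw 10000000 (by norm_num)
  by_cases h0 : n = 0
  · subst h0; decide
  · by_cases hsm : n < 10000000
    · unfold int_to_indian_words
      rw [chunk_eq n.natAbs n (by omega) hsm, B_small n (by omega) hsm]
    · -- 10^7 ≤ n ≤ 2^31
      have hq1 : 1 ≤ n / 10000000 := by omega
      have hq2 : n / 10000000 < 10000000 := by omega
      have hr0 : 0 ≤ n % 10000000 := by omega
      have hr7 : n % 10000000 < 10000000 := by omega
      unfold int_to_indian_words
      rw [A_step n.natAbs n (by omega)]
      rw [if_pos (by rw [e7.1]; omega)]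
      have hnat : n.natAbs = (n.natAbs - 1) + 1 := by omega
      rw [hnat, chunk_eq _ _ (by rw [e7.1]; omega) (by rw [e7.1]; omega)]
      obtain ⟨hjoin, hclean, hzero, hne⟩ := low_master (PySem.Int.mod n 10000000)
        (by rw [e7.2]; omega) (by rw [e7.2]; omega)
      have hcroreclean : cleanS (chunkB (PySem.Int.floordiv n 10000000) ++ " Crore") = true := by
        exact cleanS_append_word (by rw [e7.1]; exact chunkB_clean _ (by omega) (by omega))
          (by decide)
      rw [strip_join_filter _ (by
        intro p hp
        simp only [List.singleton_append, List.mem_cons] at hp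
        rcases hp with rfl | hp
        · exact hcroreclean
        · exact hclean p hp)]
      rw [B_big n (by omega) hd]
      by_cases hz : PySem.Int.mod n 10000000 = 0
      · have hz' : chunkB (n % 10000000) = "" := by
          rw [show n % 10000000 = (0:Int) by rwa [e7.2] at hz]; decide
        rw [hzero hz, if_neg (by simp [e7.2, hz'])]
      · have hz2 : n % 10000000 ≠ 0 := by rwa [e7.2] at hz
        have hcne : chunkB (PySem.Int.mod n 10000000) ≠ "" := by
          rw [e7.2]
          exact cleanS_ne_empty (chunkB_clean _ (by omega) (by omega))
        rw [if_pos hcne]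
        have hsplit := joinS_append
          (xs := [chunkB (PySem.Int.floordiv n 10000000) ++ " Crore"])
          (ys := lowPieces (PySem.Int.mod n 10000000)) (by simp) (hne hz)
        simp only [List.singleton_append] at hsplit ⊢
        rw [hsplit, hjoin, joinS_single, ← joinS_pair]
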